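-- pv_equiv track=rewrite | github.com/FelipeVieira27/ListasPPZ | Codigos em aula/Seletiva Hackathon/seletivahackathon.py | hack
-- ===== SOURCE A (Python) =====
-- def hack (n, k):
--     lista = []
--     for k in range (2**n):
--         lista.append (bin(k))
--     def um(x):
--         return x.count("1")
--     lista.sort(key=um, reverse=True)
--     return lista
-- ===== SOURCE B (Python) =====
-- def hack(n, k):
--     # Bucket (counting) sort: place each bin-string in the bucket of its popcount,
--     # then emit buckets from highest count to lowest, preserving order within a bucket.
--     buckets = [[] for _ in range(n + 1)]
--     for i in range(2 ** n):
--         s = bin(i)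
--         buckets[s.count("1")].append(s)
--     out = []
--     for b in reversed(buckets):
--         out += b
--     return out
-- ===== Notes on version B (the rewrite author's own statement) =====
-- stated objective: faster
-- what changed: Replaced the stable reverse comparison sort over all 2**n bin-strings by a single-pass bucket (counting) sort into n+1 popcount buckets emitted from highest count to lowest, which preserves the tie order without any comparisons.
import Mathlib
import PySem

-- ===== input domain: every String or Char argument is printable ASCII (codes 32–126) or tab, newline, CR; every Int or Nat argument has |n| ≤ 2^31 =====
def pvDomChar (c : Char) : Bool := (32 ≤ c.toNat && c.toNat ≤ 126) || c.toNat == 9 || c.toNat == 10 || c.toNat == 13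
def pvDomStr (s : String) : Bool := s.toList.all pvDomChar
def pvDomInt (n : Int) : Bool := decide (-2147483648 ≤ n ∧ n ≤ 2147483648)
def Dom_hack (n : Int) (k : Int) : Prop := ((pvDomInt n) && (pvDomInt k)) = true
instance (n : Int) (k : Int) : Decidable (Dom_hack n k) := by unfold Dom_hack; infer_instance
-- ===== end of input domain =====

-- B replaces A's stable reverse comparison sort by a one-pass bucket (counting) sort on the
-- popcount (objective: faster by a constant factor; same return value).

-- ===== PORT A =====
-- shared helper: Python's bin(i)
def binDigits : Nat → List Char
  | 0 => []
  | m+1 => binDigits ((m+1)/2) ++ [if (m+1) % 2 == 1 then '1' else '0']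
decreasing_by exact Nat.div_lt_self (Nat.succ_pos m) one_lt_two

def binCore (m : Nat) : List Char := if m = 0 then ['0'] else binDigits m
def binChars (i : Int) : List Char :=
  if i < 0 then '-' :: '0' :: 'b' :: binCore i.natAbs else '0' :: 'b' :: binCore i.toNat
def pyBin (i : Int) : String := String.ofList (binChars i)

def hack (n : Int) (k : Int) : List String :=
  let lista := (PySem.List.pyRange 0 ((2:Int) ^ n.toNat) 1).foldl
    (fun acc j => acc ++ [pyBin j]) ([] : List String)
  PySem.List.sorted lista (fun x => PySem.Str.count x "1") true

-- ===== PORT B =====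
def hack_alt (n : Int) (k : Int) : List String :=
  let buckets0 : List (List String) := List.replicate (n+1).toNat []
  let buckets := (PySem.List.pyRange 0 ((2:Int) ^ n.toNat) 1).foldl
    (fun bs i =>
      let s := pyBin i
      let c := PySem.Str.count s "1"
      bs.set c (bs.getD c [] ++ [s])) buckets0
  buckets.reverse.foldl (fun acc b => acc ++ b) []

-- ===== PRECONDITION & SPEC =====
-- Pre_hack: Python raises TypeError for n < 0 (2**n is a float, range() rejects it).
def Pre_hack (n : Int) (k : Int) : Prop := 0 ≤ n
instance (n : Int) (k : Int) : Decidable (Pre_hack n k) := by unfold Pre_hack; infer_instance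
def pvWitness_hack : Int × Int := (3, 0)
def Spec_hack (n : Int) (k : Int) (out : List String) : Prop := out = hack_alt n k
instance (n : Int) (k : Int) (out : List String) : Decidable (Spec_hack n k out) := by unfold Spec_hack; infer_instance

-- ===== CLAIM (what is proved, stated in full; the proofs are below) =====
def Claim_equal_hack : Prop := ∀ (n : Int) (k : Int), Dom_hack n k → Pre_hack n k → Spec_hack n k (hack n k)

-- ===== LEMMAS AND PROOFS =====
-- go lemma
theorem count_go_one (l : List Char) : ∀ (fuel acc : Nat), l.length ≤ fuel →
    PySem.Chars.count.go ['1'] fuel l acc = acc + l.count '1' := by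
  induction l with
  | nil => intro fuel acc _; cases fuel <;> simp [PySem.Chars.count.go]
  | cons h t ih =>
    intro fuel acc hf
    cases fuel with
    | zero => simp at hf
    | succ f =>
      by_cases h1 : h = '1'
      · subst h1
        simp [PySem.Chars.count.go, List.isPrefixOf, ih f (acc+1) (by simpa using hf), List.count_cons]
        omega
      · simp [PySem.Chars.count.go, List.isPrefixOf, h1, Ne.symm h1,
          ih f acc (by simpa using hf), List.count_cons]

theorem count_one_eq (cs : List Char) : PySem.Str.count (String.ofList cs) "1" = cs.count '1' := by
  have : PySem.Chars.count cs ['1'] = cs.count '1' := by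
    simp [PySem.Chars.count, count_go_one cs cs.length 0 le_rfl]
  simpa [PySem.Str.count] using this

theorem binDigits_length_le : ∀ (t m : Nat), m < 2^t → (binDigits m).length ≤ t := by
  intro t
  induction t with
  | zero => intro m hm; interval_cases m; simp [binDigits]
  | succ t ih =>
    intro m hm
    match m with
    | 0 => simp [binDigits]
    | m+1 =>
      rw [binDigits]
      have h2 : (m+1)/2 < 2^t := by omega
      have := ih _ h2
      simp; omega

theorem cnt_le (t : Nat) (i : Int) (h0 : 0 ≤ i) (h : i < (2:Int)^t) :
    PySem.Str.count (pyBin i) "1" ≤ t := by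
  rw [pyBin, count_one_eq]
  rw [binChars, if_neg (by omega)]
  by_cases hz : i.toNat = 0
  · simp [binCore, hz]
  · rw [binCore, if_neg hz]
    have hlt : i.toNat < 2^t := by
      have : ((i.toNat : Int)) < (2:Int)^t := by rwa [Int.toNat_of_nonneg h0]
      exact_mod_cast this
    have h1 := binDigits_length_le t i.toNat hlt
    have h2 := List.count_le_length (l := binDigits i.toNat) (a := '1')
    simp [List.count_cons]
    omega

-- insertBy append/skip lemmas
theorem insertBy_append_left {α : Type} (before : α → α → Bool) (x : α) (l r : List α)
    (h : ∀ y ∈ l, before x y = false) :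
    PySem.List.insertBy before x (l ++ r) = l ++ PySem.List.insertBy before x r := by
  induction l with
  | nil => rfl
  | cons y ys ih =>
    have hy : before x y = false := h y (by simp)
    show (if before x y then _ else _) = _
    rw [hy]
    simp only [Bool.false_eq_true, if_false, List.cons_append, List.append_eq]
    rw [ih (fun z hz => h z (by simp [hz]))]

theorem insertBy_all_before {α : Type} (before : α → α → Bool) (x : α) (r : List α)
    (h : ∀ y ∈ r, before x y = true) :
    PySem.List.insertBy before x r = x :: r := by
  cases r with
  | nil => rfl
  | cons y ys =>
    show (if before x y then _ else _) = _
    rw [h y (by simp)]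
    simp

def bucketsCat {α : Type} (key : α → Nat) (n : Nat) (xs : List α) : List α :=
  ((List.range (n+1)).reverse).flatMap (fun c => xs.filter (fun x => key x == c))

theorem insert_bucketsCat {α : Type} (key : α → Nat) (n : Nat) (x : α) (xs : List α)
    (hx : key x ≤ n) :
    PySem.List.insertBy (fun a b => decide (key b < key a)) x (bucketsCat key n xs)
      = bucketsCat key n (xs ++ [x]) := by
  have hsplit : List.range (n+1)
      = List.range' 0 (key x) ++ [key x] ++ List.range' (key x + 1) (n - key x) := by
    rw [List.range_eq_range']
    rw [show n + 1 = key x + (1 + (n - key x)) by omega]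
    rw [← List.range'_append]
    rw [← List.range'_append]
    simp [List.range'_one]
  have hf : ∀ (c : Nat) (y : α), y ∈ xs.filter (fun x => key x == c) → key y = c := by
    intro c y hy
    have := (List.mem_filter.mp hy).2
    simpa using this
  rw [bucketsCat, hsplit]
  simp only [List.reverse_append, List.reverse_singleton, List.flatMap_append,
    List.flatMap_singleton, List.append_assoc]
  rw [← List.append_assoc]
  rw [insertBy_append_left _ _ _ _ (by
    intro y hy
    rcases List.mem_append.mp hy with hhi | hmid
    · rcases List.mem_flatMap.mp hhi with ⟨c, hc, hyc⟩
      have hky := hf c y hyc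
      have : key x + 1 ≤ c := by
        have := List.mem_reverse.mp hc
        have := List.mem_range'.mp this
        omega
      simp; omega
    · have := hf (key x) y hmid
      simp; omega)]
  rw [insertBy_all_before _ _ _ (by
    intro y hy
    rcases List.mem_flatMap.mp hy with ⟨c, hc, hyc⟩
    have hky := hf c y hyc
    have := List.mem_range'.mp (List.mem_reverse.mp hc)
    simp; omega)]
  rw [bucketsCat, hsplit]
  simp only [List.reverse_append, List.reverse_singleton, List.flatMap_append,
    List.flatMap_singleton, List.append_assoc, List.filter_append]
  have hfx : ∀ c : Nat, c ≠ key x → List.filter (fun s => key s == c) [x] = [] := by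
    intro c hc; simp [Ne.symm hc]
  have hfx2 : List.filter (fun s => key s == key x) [x] = [x] := by simp
  have e1 : List.flatMap (fun c => List.filter (fun y => key y == c) xs ++ List.filter (fun y => key y == c) [x]) (List.range' (key x + 1) (n - key x)).reverse
      = List.flatMap (fun c => List.filter (fun y => key y == c) xs) (List.range' (key x + 1) (n - key x)).reverse := by
    apply List.flatMap_congr
    intro c hc
    have := List.mem_range'.mp (List.mem_reverse.mp hc)
    rw [hfx c (by omega)]; simp
  have e2 : List.flatMap (fun c => List.filter (fun y => key y == c) xs ++ List.filter (fun y => key y == c) [x]) (List.range' 0 (key x)).reverse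
      = List.flatMap (fun c => List.filter (fun y => key y == c) xs) (List.range' 0 (key x)).reverse := by
    apply List.flatMap_congr
    intro c hc
    have := List.mem_range'.mp (List.mem_reverse.mp hc)
    rw [hfx c (by omega)]; simp
  rw [e1, e2, hfx2]
  simp

theorem sorted_rev_eq_bucketsCat {α : Type} (key : α → Nat) (n : Nat) (xs : List α)
    (h : ∀ x ∈ xs, key x ≤ n) :
    PySem.List.sorted xs key true = bucketsCat key n xs := by
  rw [PySem.List.sorted_rev_eq_foldl_insertBy]
  induction xs using List.reverseRecOn with
  | nil => simp [bucketsCat]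
  | append_singleton ys x ih =>
    rw [List.foldl_append, List.foldl_cons, List.foldl_nil]
    rw [ih (fun y hy => h y (by simp [hy]))]
    exact insert_bucketsCat key n x ys (h x (by simp))

theorem map_getD_range (bs : List (List String)) :
    (List.range bs.length).map (fun c => bs.getD c []) = bs := by
  apply List.ext_getElem
  · simp
  · intro i h1 h2
    simp [List.getD_eq_getElem?_getD, List.getElem?_eq_getElem h2]

theorem fold_buckets (l : List Int) : ∀ (bs : List (List String)),
    (∀ i ∈ l, PySem.Str.count (pyBin i) "1" < bs.length) →
    l.foldl (fun bs i => bs.set (PySem.Str.count (pyBin i) "1") (bs.getD (PySem.Str.count (pyBin i) "1") [] ++ [pyBin i])) bs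
      = (List.range bs.length).map
          (fun c => bs.getD c [] ++ (l.map pyBin).filter (fun s => PySem.Str.count s "1" == c)) := by
  induction l with
  | nil =>
    intro bs _
    simpa using (map_getD_range bs).symm
  | cons i t ih =>
    intro bs h
    have hi : PySem.Str.count (pyBin i) "1" < bs.length := h i (by simp)
    rw [List.foldl_cons, ih _ (by intro j hj; simpa using h j (by simp [hj]))]
    rw [List.length_set]
    apply List.map_congr_left
    intro c hc
    have hclt : c < bs.length := List.mem_range.mp hc
    by_cases hce : c = PySem.Str.count (pyBin i) "1"
    · subst hce
      have hsl : PySem.Str.count (pyBin i) "1" < (bs.set (PySem.Str.count (pyBin i) "1") (bs.getD (PySem.Str.count (pyBin i) "1") [] ++ [pyBin i])).length := by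
        simpa using hi
      rw [List.getD_eq_getElem _ _ hsl, List.getElem_set_self, List.getD_eq_getElem _ _ hi]
      simp [List.filter_cons]
    · have hsl : c < (bs.set (PySem.Str.count (pyBin i) "1") (bs.getD (PySem.Str.count (pyBin i) "1") [] ++ [pyBin i])).length := by
        simpa using hclt
      rw [List.getD_eq_getElem _ _ hsl, List.getElem_set_ne (by omega),
          List.getD_eq_getElem _ _ hclt]
      have hce' : ¬PySem.Chars.count (pyBin i).toList ['1'] = c := by
        simp [PySem.Str.count] at hce; omega
      simp [List.filter_cons, hce']

theorem hack_eq (n : Int) (k : Int) (hn : 0 ≤ n) : hack n k = hack_alt n k := by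
  have hR : PySem.List.pyRange 0 ((2:Int)^n.toNat) 1
      = List.map (fun m : Nat => (m : Int)) (List.range (2^n.toNat)) := by
    have hc : ((2^n.toNat : Nat) : Int) = (2:Int)^n.toNat := by push_cast; ring
    rw [← hc]
    exact PySem.List.pyRange_zero_natCast _
  have ht1 : (n+1).toNat = n.toNat + 1 := by omega
  have hbound : ∀ i ∈ PySem.List.pyRange 0 ((2:Int)^n.toNat) 1,
      PySem.Str.count (pyBin i) "1" ≤ n.toNat := by
    intro i hi
    rw [hR] at hi
    rcases List.mem_map.mp hi with ⟨m, hm, rfl⟩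
    have hmlt : m < 2^n.toNat := List.mem_range.mp hm
    refine cnt_le n.toNat _ (by positivity) ?_
    exact_mod_cast hmlt
  unfold hack hack_alt
  simp only [PySem.List.foldl_append_singleton_eq_map, List.nil_append]
  rw [sorted_rev_eq_bucketsCat (fun x => PySem.Str.count x "1") n.toNat _ (by
    intro x hx
    rcases List.mem_map.mp hx with ⟨i, hi, rfl⟩
    exact hbound i hi)]
  rw [fold_buckets _ _ (by
    intro i hi
    have h2 := hbound i hi
    simp only [List.length_replicate, ht1]
    simp [PySem.Str.count] at h2 ⊢
    omega)]
  rw [PySem.List.foldl_append_eq_flatten]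
  simp only [List.nil_append, List.length_replicate, ht1]
  have hrep : ∀ c, (List.replicate (n.toNat+1) ([] : List String)).getD c [] = [] := by
    intro c
    simp only [List.getD_eq_getElem?_getD, List.getElem?_replicate]
    split <;> rfl
  have hmap : List.map (fun c => (List.replicate (n.toNat+1) ([] : List String)).getD c []
        ++ List.filter (fun s => PySem.Str.count s "1" == c)
            (List.map pyBin (PySem.List.pyRange 0 ((2:Int)^n.toNat) 1)))
        (List.range (n.toNat+1))
      = List.map (fun c => List.filter (fun s => PySem.Str.count s "1" == c)
            (List.map pyBin (PySem.List.pyRange 0 ((2:Int)^n.toNat) 1)))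
        (List.range (n.toNat+1)) := by
    apply List.map_congr_left
    intro c hc
    rw [hrep c]
    simp
  rw [hmap]
  simp [bucketsCat, List.flatMap_def, List.map_reverse]

-- ===== VERDICT (by name: the statement is the Claim_ definition above) =====
theorem hack_spec : Claim_equal_hack := by
  intro n k _ hpre
  exact hack_eq n k hpre
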